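-- pv_equiv track=rewrite | github.com/sarahaliene/CS410Group | processing.py | remove_hyperlinks
-- ===== SOURCE A (Python) =====
-- url_words = set()
--
-- def remove_hyperlinks(tweet):
--
--     new_tweet_list = []
--
--     for token in tweet:
--
--         for chunk in url_words:
--
--             if chunk in token:
--
--                 token = 'd3l3t3'
--
--         if token != 'd3l3t3':
--
--             new_tweet_list.append(token)
--
--     return(new_tweet_list)
-- ===== SOURCE B (Python) =====
-- url_words = set()
--
-- def remove_hyperlinks(tweet):
--     # url_words is empty in this module, so the inner chunk scan never fires:
--     # the function simply drops tokens equal to the sentinel 'd3l3t3'.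
--     return [token for token in tweet if token != 'd3l3t3']
-- ===== Notes on version B (the rewrite author's own statement) =====
-- stated objective: simpler
-- what changed: Replaced the per-token scan over the (empty) url_words set with a single filter comprehension dropping tokens equal to the sentinel 'd3l3t3'.
import Mathlib
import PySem

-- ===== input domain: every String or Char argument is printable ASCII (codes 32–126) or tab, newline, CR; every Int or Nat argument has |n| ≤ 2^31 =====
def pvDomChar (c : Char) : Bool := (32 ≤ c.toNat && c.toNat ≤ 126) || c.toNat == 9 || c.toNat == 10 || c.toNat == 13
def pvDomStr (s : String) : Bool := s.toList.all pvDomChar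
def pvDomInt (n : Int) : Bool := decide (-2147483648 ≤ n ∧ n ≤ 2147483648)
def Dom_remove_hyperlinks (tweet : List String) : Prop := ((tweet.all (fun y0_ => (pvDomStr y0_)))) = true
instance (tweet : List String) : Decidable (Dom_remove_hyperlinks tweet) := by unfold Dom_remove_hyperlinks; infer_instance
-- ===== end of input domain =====

-- B replaces A's per-token loop over the empty url_words set with one filter comprehension; objective: simpler.


-- ===== PORT A =====
-- module-level: url_words = set()  (empty)
def url_words : PySem.Set String := PySem.Set.ofList []

def remove_hyperlinks (tweet : List String) : List String :=
  let new_tweet_list : List String := []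
  tweet.foldl (fun new_tweet_list token =>
    -- for chunk in url_words: if chunk in token: token = 'd3l3t3'
    let token := (url_words : List String).foldl
      (fun token chunk => if PySem.Str.isIn chunk token then "d3l3t3" else token) token
    if token ≠ "d3l3t3" then new_tweet_list ++ [token] else new_tweet_list)
    new_tweet_list

-- ===== PORT B =====
def remove_hyperlinks_alt (tweet : List String) : List String :=
  tweet.filter (fun token => token ≠ "d3l3t3")

-- ===== PRECONDITION & SPEC =====
def Spec_remove_hyperlinks (tweet : List String) (out : List String) : Prop := out = remove_hyperlinks_alt tweet
instance (tweet : List String) (out : List String) : Decidable (Spec_remove_hyperlinks tweet out) := by unfold Spec_remove_hyperlinks; infer_instance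

-- ===== CLAIM (what is proved, stated in full; the proofs are below) =====
def Claim_equal_remove_hyperlinks : Prop := ∀ (tweet : List String), Dom_remove_hyperlinks tweet → Spec_remove_hyperlinks tweet (remove_hyperlinks tweet)

-- ===== LEMMAS AND PROOFS =====
theorem remove_hyperlinks_acc (tweet : List String) (acc : List String) :
    tweet.foldl (fun new_tweet_list token =>
      let token := (url_words : List String).foldl
        (fun token chunk => if PySem.Str.isIn chunk token then "d3l3t3" else token) token
      if token ≠ "d3l3t3" then new_tweet_list ++ [token] else new_tweet_list) acc
    = acc ++ tweet.filter (fun token => token ≠ "d3l3t3") := by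
  have hurl : (url_words : List String) = [] := rfl
  simp only [hurl, List.foldl_nil]
  induction tweet generalizing acc with
  | nil => simp
  | cons t ts ih =>
    rw [List.foldl_cons, List.filter_cons, ih]
    by_cases h : t = "d3l3t3" <;> simp [h]

-- ===== VERDICT (by name: the statement is the Claim_ definition above) =====
theorem remove_hyperlinks_spec : Claim_equal_remove_hyperlinks := by
  intro tweet _
  unfold Spec_remove_hyperlinks remove_hyperlinks remove_hyperlinks_alt
  simpa using remove_hyperlinks_acc tweet []
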